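-- pv_equiv track=rewrite | github.com/Agentic-Environmental-Engineering/GymVerse | gem/gem/envs/RLVE/factorial_trailing_zero_count_env.py | _compute_trailing_zeros
-- ===== SOURCE A (Python) =====
-- from typing import Any, Optional, SupportsFloat, Tuple
--
-- def _compute_trailing_zeros(n: int, k: int) -> int:
--     """
--     Compute the number of trailing zeros of n! in base k.
--
--     The number of trailing zeros in base k is determined by the minimum over all prime
--     factors p_i of k of floor(v_{p_i}(n!) / c_i), where k = prod p_i^{c_i}.
--     """
--     # Factorize k into primes: k = product p_i^{c_i}
--     primes: list[int] = []
--     counts: list[int] = []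
--     t = k
--     i = 2
--     while i * i <= t:
--         if t % i == 0:
--             cnt = 0
--             while t % i == 0:
--                 t //= i
--                 cnt += 1
--             primes.append(i)
--             counts.append(cnt)
--         i += 1
--     if t > 1:
--         primes.append(t)
--         counts.append(1)
--
--     # Compute min_i floor(v_p_i(n!) / c_i)
--     ans: Optional[int] = None
--     for idx, p in enumerate(primes):
--         exp = 0
--         now = n
--         while now:
--             now //= p
--             exp += now
--         t_val = exp // counts[idx]
--         if ans is None or t_val < ans:
--             ans = t_val
--
--     return ans if ans is not None else 0
-- ===== SOURCE B (Python) =====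
-- def _compute_trailing_zeros(n: int, k: int) -> int:
--     """
--     Trailing zeros of n! in base k.
--
--     Different decomposition: k is factorized by a recursive smallest-prime-factor
--     extraction (restarting the divisor scan from 2 each time) instead of one sweep
--     with primes/counts lists; v_p(n!) is summed over ascending prime powers
--     (q *= p) instead of repeated n //= p; and the answer is min() over a
--     generator with default=0 instead of an indexed running-minimum loop.
--     """
--
--     def factorize(t):
--         # [(p, c)] with t = prod p^c, primes increasing, by smallest-factor extraction
--         if t <= 1:
--             return []
--         d = 2
--         while d * d <= t and t % d:
--             d += 1
--         p = t if d * d > t else d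
--         c = 0
--         while t % p == 0:
--             t //= p
--             c += 1
--         return [(p, c)] + factorize(t)
--
--     def vp_factorial(p):
--         # v_p(n!) = sum over prime powers q = p, p^2, ... <= n of n // q
--         e, q = 0, p
--         while q <= n:
--             e += n // q
--             q *= p
--         return e
--
--     return min((vp_factorial(p) // c for p, c in factorize(k)), default=0)
-- ===== Notes on version B (the rewrite author's own statement) =====
-- stated objective: alternative
-- what changed: B factorizes k by recursive smallest-prime-factor extraction (restarting the trial scan from 2 per prime) instead of one sweep filling primes/counts lists, computes v_p(n!) by summing n//q over ascending prime powers q*=p instead of repeatedly halving now//=p, and takes min() over a generator with default=0 instead of an indexed running-minimum loop.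
import Mathlib
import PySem

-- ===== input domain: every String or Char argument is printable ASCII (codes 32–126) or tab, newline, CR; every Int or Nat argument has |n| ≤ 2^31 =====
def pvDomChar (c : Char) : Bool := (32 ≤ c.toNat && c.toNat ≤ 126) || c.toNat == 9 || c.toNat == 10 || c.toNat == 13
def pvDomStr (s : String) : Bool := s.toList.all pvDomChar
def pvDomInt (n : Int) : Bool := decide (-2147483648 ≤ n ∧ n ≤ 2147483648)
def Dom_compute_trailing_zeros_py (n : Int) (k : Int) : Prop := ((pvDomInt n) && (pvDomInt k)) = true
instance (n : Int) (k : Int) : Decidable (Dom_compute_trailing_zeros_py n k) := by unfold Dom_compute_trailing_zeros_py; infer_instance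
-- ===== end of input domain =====

-- Trailing zeros of n! in base k.  B factorizes k by recursive smallest-prime-factor
-- extraction (restarting the trial scan from 2 for each prime), sums v_p(n!) over
-- ascending prime powers (q *= p), and takes min() with default 0 over the factors —
-- no primes/counts lists, no indexed running-minimum loop.
-- Equivalence of the RETURN values is proved on Pre_ (where the Python A terminates).

-- termination facts cited by the ports' decreasing_by (proved here so the ports can cite them)
theorem pvFdivBounds (t i : Int) (ht : 1 ≤ t) (hi : 2 ≤ i) :
    0 ≤ PySem.Int.floordiv t i ∧ PySem.Int.floordiv t i < t := by
  have h0t : (0 : Int) < t := lt_of_lt_of_le zero_lt_one ht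
  have h0i : (0 : Int) < i := lt_of_lt_of_le zero_lt_two hi
  constructor
  · rw [PySem.Int.le_floordiv_iff_mul_le h0i, zero_mul]
    exact le_of_lt h0t
  · rw [PySem.Int.floordiv_lt_iff_lt_mul h0i]
    calc t = t * 1 := (mul_one t).symm
    _ < t * i := mul_lt_mul_of_pos_left (lt_of_lt_of_le one_lt_two hi) h0t

theorem pvSqFacts (t i : Int) (hi : 2 ≤ i) (h : i * i ≤ t) : i ≤ t ∧ 4 ≤ t := by
  have h0i : (0 : Int) ≤ i := le_trans zero_le_two hi
  constructor
  · exact le_trans (le_mul_of_one_le_left h0i (le_trans one_le_two hi)) h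
  · calc (4 : Int) = 2 * 2 := by norm_num
    _ ≤ i * i := mul_le_mul hi hi zero_le_two h0i
    _ ≤ t := h

theorem pvPosSub (t i : Int) (hit : i ≤ t) (h4 : 4 ≤ t) : 0 < 2 * t - i := by
  refine sub_pos.mpr (lt_of_le_of_lt hit ?_)
  rw [two_mul]
  exact lt_add_of_pos_left t (lt_of_lt_of_le four_pos h4)

theorem pvDecFdiv1 (t i : Int) (h : 2 ≤ i ∧ 1 ≤ t ∧ PySem.Int.mod t i = 0) :
    (PySem.Int.floordiv t i).toNat < t.toNat :=
  (Int.toNat_lt_toNat (lt_of_lt_of_le zero_lt_one h.2.1)).mpr (pvFdivBounds t i h.2.1 h.1).2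

theorem pvDecFdiv0 (p now : Int) (h : ¬ now = 0 ∧ 0 < now ∧ 2 ≤ p) :
    (PySem.Int.floordiv now p).toNat < now.toNat := by
  have h1 : (1 : Int) ≤ now := by
    have h2 := h.2.1
    rwa [Int.lt_iff_add_one_le, zero_add] at h2
  exact (Int.toNat_lt_toNat h.2.1).mpr (pvFdivBounds now p h1 h.2.2).2

-- ===== PORT A =====
-- inner `while t % i == 0: t //= i; cnt += 1` of A's factor loop; returns (cnt, t)
def pyExtract (t i : Int) : Int × Int :=
  if h : 2 ≤ i ∧ 1 ≤ t ∧ PySem.Int.mod t i = 0 then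
    let r := pyExtract (PySem.Int.floordiv t i) i
    (r.1 + 1, r.2)
  else (0, t)
termination_by t.toNat
decreasing_by
  exact pvDecFdiv1 t i h

theorem pvExtract_spec (t i : Int) : 1 ≤ t → 2 ≤ i →
    1 ≤ (pyExtract t i).2 ∧ (pyExtract t i).2 ≤ t ∧ (pyExtract t i).2 ∣ t ∧
      ¬ (i ∣ (pyExtract t i).2) ∧ 0 ≤ (pyExtract t i).1 ∧
      (PySem.Int.mod t i = 0 → 1 ≤ (pyExtract t i).1) := by
  fun_induction pyExtract t i with
  | case1 t h r ih =>
    intro ht hi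
    simp only [show r = pyExtract (PySem.Int.floordiv t i) i from rfl]
    have hdvd : i ∣ t := (PySem.Int.mod_eq_zero_iff_dvd t i).mp h.2.2
    have hti : i ≤ t := Int.le_of_dvd (by omega) hdvd
    have hq1 : 1 ≤ PySem.Int.floordiv t i := by
      rw [PySem.Int.le_floordiv_iff_mul_le (by omega)]; omega
    have hqb := pvFdivBounds t i ht hi
    have hqdvd : PySem.Int.floordiv t i ∣ t := by
      have hm := PySem.Int.floordiv_mul_add_mod t i
      rw [h.2.2, add_zero] at hm
      exact ⟨i, hm.symm⟩
    obtain ⟨i1, i2, i3, i4, i5, -⟩ := ih hq1 hi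
    exact ⟨i1, by omega, i3.trans hqdvd, i4, by omega, fun _ => by omega⟩
  | case2 t h =>
    intro ht hi
    refine ⟨ht, le_refl t, dvd_refl t, ?_, le_refl 0, ?_⟩
    · intro hd
      exact h ⟨hi, ht, (PySem.Int.mod_eq_zero_iff_dvd t i).mpr hd⟩
    · intro hm
      exact absurd ⟨hi, ht, hm⟩ h

theorem pvDecA1 (t i : Int) (h : 2 ≤ i ∧ i * i ≤ t) :
    (2 * t - (i + 1)).toNat < (2 * t - i).toNat := by
  have hf := pvSqFacts t i h.1 h.2
  refine (Int.toNat_lt_toNat (pvPosSub t i hf.1 hf.2)).mpr ?_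
  rw [sub_add_eq_sub_sub]
  exact sub_one_lt (2 * t - i)

theorem pvDecA2 (t i : Int) (h : 2 ≤ i ∧ i * i ≤ t) :
    (2 * (pyExtract t i).2 - (i + 1)).toNat < (2 * t - i).toNat := by
  have hf := pvSqFacts t i h.1 h.2
  have hs := pvExtract_spec t i (le_trans (by norm_num) hf.2) h.1
  refine (Int.toNat_lt_toNat (pvPosSub t i hf.1 hf.2)).mpr ?_
  refine lt_of_le_of_lt (sub_le_sub_right (mul_le_mul_of_nonneg_left hs.2.1 zero_le_two) (i + 1)) ?_
  rw [sub_add_eq_sub_sub]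
  exact sub_one_lt (2 * t - i)

-- `while i * i <= t:` factor loop of A, with the primes/counts accumulators
def aFactLoop (primes counts : List Int) (t i : Int) : List Int × List Int × Int :=
  if h : 2 ≤ i ∧ i * i ≤ t then
    if PySem.Int.mod t i = 0 then
      let e := pyExtract t i
      aFactLoop (primes ++ [i]) (counts ++ [e.1]) e.2 (i + 1)
    else aFactLoop primes counts t (i + 1)
  else (primes, counts, t)
termination_by (2 * t - i).toNat
decreasing_by
  · exact pvDecA2 t i h
  · exact pvDecA1 t i h

-- `while now: now //= p; exp += now`  (guard beyond `now ≠ 0` only totalizes)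
def aLegLoop (p now exp : Int) : Int :=
  if _h : ¬ now = 0 ∧ 0 < now ∧ 2 ≤ p then
    aLegLoop p (PySem.Int.floordiv now p) (exp + PySem.Int.floordiv now p)
  else exp
termination_by now.toNat
decreasing_by
  exact pvDecFdiv0 p now _h

-- `for idx, p in enumerate(primes): ...` (idx is the enumerate counter; counts[idx] is always in range)
def aAnsLoop (n : Int) (counts : List Int) : Int → List Int → Option Int → Option Int
  | _, [], ans => ans
  | idx, p :: rest, ans =>
    let exp := aLegLoop p n 0
    let tv := PySem.Int.floordiv exp (PySem.List.pyGetD counts idx 0)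
    aAnsLoop n counts (idx + 1) rest
      (match ans with
       | none => some tv
       | some b => if tv < b then some tv else some b)

def compute_trailing_zeros_py (n : Int) (k : Int) : Int :=
  let f := aFactLoop [] [] k 2
  let primes := if 1 < f.2.2 then f.1 ++ [f.2.2] else f.1
  let counts := if 1 < f.2.2 then f.2.1 ++ [(1 : Int)] else f.2.1
  match aAnsLoop n counts 0 primes none with
  | some a => a
  | none => 0

-- ===== PORT B =====
-- fuel-based totalizations of Source B's loops (the fuel arguments only make the
-- recursions structural; they are large enough on every admitted input)

-- B's `while d * d <= t and t % d: d += 1` smallest-factor scan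
def spfScanF : Nat → Int → Int → Int
  | 0, _, d => d
  | fu + 1, t, d =>
    if d * d ≤ t ∧ PySem.Int.mod t d ≠ 0 then spfScanF fu t (d + 1) else d

-- B's `while t % p == 0: t //= p; c += 1`; returns (t, c)
def bStripF : Nat → Int → Int → Int × Int
  | 0, t, _ => (t, 0)
  | fu + 1, t, p =>
    if PySem.Int.mod t p = 0 then
      let r := bStripF fu (PySem.Int.floordiv t p) p
      (r.1, r.2 + 1)
    else (t, 0)

-- B's recursive `factorize(t)`: smallest prime factor first, then recurse on the quotient
def bFactorizeF : Nat → Int → List (Int × Int)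
  | 0, _ => []
  | fu + 1, t =>
    if t ≤ 1 then []
    else
      let d := spfScanF ((t - 2).toNat + 1) t 2
      let p := if t < d * d then t else d
      let s := bStripF t.toNat t p
      (p, s.2) :: bFactorizeF fu s.1

def bFactorize (t : Int) : List (Int × Int) := bFactorizeF t.toNat t

-- B's `while q <= n: e += n // q; q *= p`
def bVpF : Nat → Int → Int → Int → Int → Int
  | 0, _, _, _, e => e
  | fu + 1, n, p, q, e =>
    if q ≤ n then bVpF fu n p (q * p) (e + PySem.Int.floordiv n q) else e

-- `min(gen, default=0)` over the per-prime values
def compute_trailing_zeros_py_alt (n : Int) (k : Int) : Int :=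
  match (bFactorize k).map
      (fun pc => PySem.Int.floordiv (bVpF ((n + 1 - pc.1).toNat + 1) n pc.1 pc.1 0) pc.2) with
  | [] => 0
  | v :: rest => rest.foldl min v

-- ===== PRECONDITION & SPEC =====
-- Pre_ excludes n < 0 with k ≥ 2: there the Python A loops forever (now //= p never reaches 0
-- from a negative now), so A returns no value at all.
def Pre_compute_trailing_zeros_py (n : Int) (k : Int) : Prop := 0 ≤ n ∨ k ≤ 1
instance (n : Int) (k : Int) : Decidable (Pre_compute_trailing_zeros_py n k) := by
  unfold Pre_compute_trailing_zeros_py; infer_instance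

def pvWitness_compute_trailing_zeros_py : Int × Int := (10, 12)

def Spec_compute_trailing_zeros_py (n : Int) (k : Int) (out : Int) : Prop := out = compute_trailing_zeros_py_alt n k
instance (n : Int) (k : Int) (out : Int) : Decidable (Spec_compute_trailing_zeros_py n k out) := by unfold Spec_compute_trailing_zeros_py; infer_instance

-- ===== CLAIM (what is proved, stated in full; the proofs are below) =====
def Claim_equal_compute_trailing_zeros_py : Prop := ∀ (n : Int) (k : Int), Dom_compute_trailing_zeros_py n k → Pre_compute_trailing_zeros_py n k → Spec_compute_trailing_zeros_py n k (compute_trailing_zeros_py n k)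

-- ===== LEMMAS AND PROOFS =====

-- recursive Legendre value both loops compute (proof-side characterisation)
def bLegendre (m p : Int) : Int :=
  if _h : ¬ m = 0 ∧ 0 < m ∧ 2 ≤ p then
    PySem.Int.floordiv m p + bLegendre (PySem.Int.floordiv m p) p
  else 0
termination_by m.toNat
decreasing_by
  exact pvDecFdiv0 p m _h

-- A's accumulator Legendre loop computes bLegendre
theorem legEq (p now exp : Int) : aLegLoop p now exp = exp + bLegendre now p := by
  fun_induction aLegLoop p now exp with
  | case1 now exp h ih =>
    rw [bLegendre, dif_pos h, ih]
    ring
  | case2 now exp h =>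
    rw [bLegendre, dif_neg h]
    ring

-- the minimum-folding step both programs perform per prime factor
def omin (ans : Option Int) (v : Int) : Option Int :=
  some (match ans with | none => v | some b => if v < b then v else b)

def mstep (n : Int) (ans : Option Int) (pc : Int × Int) : Option Int :=
  omin ans (PySem.Int.floordiv (bLegendre n pc.1) pc.2)

-- (prime, count) pairs produced by A's factor loop, with the leftover
def pairsA (t i : Int) : List (Int × Int) × Int :=
  if h : 2 ≤ i ∧ i * i ≤ t then
    if PySem.Int.mod t i = 0 then
      let e := pyExtract t i
      let r := pairsA e.2 (i + 1)
      ((i, e.1) :: r.1, r.2)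
    else pairsA t (i + 1)
  else ([], t)
termination_by (2 * t - i).toNat
decreasing_by
  · have h1 := pvSqFacts t i h.1 h.2
    have h2 := pvExtract_spec t i (by omega) h.1
    omega
  · have h1 := pvSqFacts t i h.1 h.2
    omega

-- the factor list (with the leftover prime) A's answer loop runs over
def pairsAList (t i : Int) : List (Int × Int) :=
  (pairsA t i).1 ++ (if 1 < (pairsA t i).2 then [((pairsA t i).2, 1)] else [])

theorem factLoop_pairs (t i : Int) : ∀ ps cs : List Int,
    aFactLoop ps cs t i =
      (ps ++ (pairsA t i).1.map Prod.fst, cs ++ (pairsA t i).1.map Prod.snd, (pairsA t i).2) := by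
  fun_induction pairsA t i with
  | case1 t i h hmod e r ih =>
    intro ps cs
    rw [aFactLoop, dif_pos h, if_pos hmod]
    rw [ih]
    simp [List.append_assoc, show r = pairsA e.2 (i + 1) from rfl,
      show e = pyExtract t i from rfl]
  | case2 t i h hmod ih =>
    intro ps cs
    rw [aFactLoop, dif_pos h, if_neg hmod]
    exact ih ps cs
  | case3 t i h =>
    intro ps cs
    rw [aFactLoop, dif_neg h]
    simp

theorem ansLoop_fold (n : Int) (C : List Int) : ∀ (ps : List Int) (idx : Nat) (ans : Option Int),
    idx + ps.length ≤ C.length →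
    aAnsLoop n C (idx : Int) ps ans = (ps.zip (C.drop idx)).foldl (mstep n) ans := by
  intro ps
  induction ps with
  | nil => intro idx ans h; simp [aAnsLoop]
  | cons p rest ih =>
    intro idx ans h
    have hlt : idx < C.length := by simp at h; omega
    have hcast : (idx : Int) + 1 = ((idx + 1 : Nat) : Int) := by push_cast; ring
    simp only [aAnsLoop]
    rw [hcast, ih (idx + 1) _ (by simp at h ⊢; omega)]
    rw [← List.getElem_cons_drop hlt]
    simp only [List.zip_cons_cons, List.foldl_cons]
    congr 1
    simp only [mstep, omin, legEq, PySem.List.pyGetD_natCast, List.getD_eq_getElem?_getD,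
      List.getElem?_eq_getElem hlt, Option.getD_some, zero_add]
    cases ans with
    | none => rfl
    | some b => dsimp only []; split <;> rfl

theorem aVal (n k : Int) :
    compute_trailing_zeros_py n k =
      (match (pairsAList k 2).foldl (mstep n) none with
       | some a => a
       | none => 0) := by
  unfold compute_trailing_zeros_py pairsAList
  rw [factLoop_pairs k 2 [] []]
  simp only [List.nil_append]
  by_cases hr : 1 < (pairsA k 2).2
  · simp only [if_pos hr]
    rw [show ((0 : Int)) = ((0 : Nat) : Int) from rfl,
      ansLoop_fold n _ _ 0 none (by simp)]
    rw [List.drop_zero, List.zip_append (by simp),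
      show ((pairsA k 2).1.map Prod.fst).zip ((pairsA k 2).1.map Prod.snd) = (pairsA k 2).1
        from (List.zip_of_prod rfl rfl).symm]
    rfl
  · simp only [if_neg hr]
    rw [show ((0 : Int)) = ((0 : Nat) : Int) from rfl,
      ansLoop_fold n _ _ 0 none (by simp)]
    rw [List.drop_zero,
      show ((pairsA k 2).1.map Prod.fst).zip ((pairsA k 2).1.map Prod.snd) = (pairsA k 2).1
        from (List.zip_of_prod rfl rfl).symm]
    simp

-- B's fuel strip loop is A's pyExtract with the components swapped
theorem bStripF_eq_pyExtract (fu : Nat) : ∀ t p : Int, 1 ≤ t → 2 ≤ p → t.toNat ≤ fu →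
    bStripF fu t p = ((pyExtract t p).2, (pyExtract t p).1) := by
  induction fu with
  | zero =>
    intro t p ht hp hfu
    omega
  | succ fu ih =>
    intro t p ht hp hfu
    by_cases hm : PySem.Int.mod t p = 0
    · have hdvd : p ∣ t := (PySem.Int.mod_eq_zero_iff_dvd t p).mp hm
      have hpt : p ≤ t := Int.le_of_dvd (by omega) hdvd
      have hq1 : 1 ≤ PySem.Int.floordiv t p := by
        rw [PySem.Int.le_floordiv_iff_mul_le (by omega)]; omega
      have hqb := pvFdivBounds t p ht hp
      rw [show bStripF (fu + 1) t p =
          ((bStripF fu (PySem.Int.floordiv t p) p).1,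
            (bStripF fu (PySem.Int.floordiv t p) p).2 + 1) from by
        simp [bStripF, if_pos hm]]
      rw [ih (PySem.Int.floordiv t p) p hq1 hp (by omega)]
      conv_rhs => rw [pyExtract, dif_pos ⟨hp, ht, hm⟩]
    · rw [show bStripF (fu + 1) t p = (t, 0) from by simp [bStripF, if_neg hm],
        pyExtract, dif_neg (fun hc => hm hc.2.2)]

theorem pvExtract_lt (t p : Int) (ht : 1 ≤ t) (hp : 2 ≤ p) (hm : PySem.Int.mod t p = 0) :
    (pyExtract t p).2 < t := by
  rw [pyExtract, dif_pos ⟨hp, ht, hm⟩]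
  have hdvd : p ∣ t := (PySem.Int.mod_eq_zero_iff_dvd t p).mp hm
  have hpt : p ≤ t := Int.le_of_dvd (by omega) hdvd
  have hq1 : 1 ≤ PySem.Int.floordiv t p := by
    rw [PySem.Int.le_floordiv_iff_mul_le (by omega)]; omega
  have hqb := pvFdivBounds t p ht hp
  have hs := pvExtract_spec (PySem.Int.floordiv t p) p hq1 hp
  simp only []
  omega

-- every candidate skipped by B's smallest-factor scan is a non-divisor below the square root
theorem pvSpfScanF_range (fu : Nat) : ∀ t d : Int, 2 ≤ d → (t - d).toNat < fu →
    d ≤ spfScanF fu t d ∧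
      (∀ j, d ≤ j → j < spfScanF fu t d → j * j ≤ t ∧ ¬ j ∣ t) ∧
      (t < spfScanF fu t d * spfScanF fu t d ∨ PySem.Int.mod t (spfScanF fu t d) = 0) := by
  induction fu with
  | zero =>
    intro t d hd hfu
    omega
  | succ fu ih =>
    intro t d hd hfu
    by_cases hg : d * d ≤ t ∧ PySem.Int.mod t d ≠ 0
    · have hsf := pvSqFacts t d hd hg.1
      have hdt : d < t := by
        rcases lt_or_eq_of_le hsf.1 with hlt | heq
        · exact hlt
        · exfalso; nlinarith [hg.1, hsf.2]
      rw [show spfScanF (fu + 1) t d = spfScanF fu t (d + 1) from by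
        simp [spfScanF, if_pos hg]]
      obtain ⟨ih1, ih2, ih3⟩ := ih t (d + 1) (by omega) (by omega)
      refine ⟨by omega, fun j hj1 hj2 => ?_, ih3⟩
      rcases eq_or_lt_of_le hj1 with heq | hlt
      · rw [← heq]
        exact ⟨hg.1, fun hdvd => hg.2 ((PySem.Int.mod_eq_zero_iff_dvd t d).mpr hdvd)⟩
      · exact ih2 j (by omega) hj2
    · rw [show spfScanF (fu + 1) t d = d from by simp [spfScanF, if_neg hg]]
      refine ⟨le_refl d,
        fun j hj1 hj2 => absurd (lt_of_le_of_lt hj1 hj2) (lt_irrefl d), ?_⟩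
      by_cases hsq : d * d ≤ t
      · by_cases hm : PySem.Int.mod t d = 0
        · exact Or.inr hm
        · exact absurd ⟨hsq, hm⟩ hg
      · exact Or.inl (by omega)

-- A's scan finds nothing when no divisor at or above i fits under the square root
theorem pairsA_none (mu : Nat) : ∀ t i : Int, (2 * t - i).toNat ≤ mu → 1 ≤ t → 2 ≤ i →
    (∀ j, i ≤ j → j * j ≤ t → ¬ j ∣ t) → pairsA t i = ([], t) := by
  induction mu with
  | zero =>
    intro t i hmu ht hi hno
    rw [pairsA, dif_neg ?_]
    intro hg
    have := pvSqFacts t i hg.1 hg.2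
    omega
  | succ mu ih =>
    intro t i hmu ht hi hno
    by_cases hg : 2 ≤ i ∧ i * i ≤ t
    · have hsf := pvSqFacts t i hg.1 hg.2
      have hmod : ¬ PySem.Int.mod t i = 0 := fun hm =>
        hno i (le_refl i) hg.2 ((PySem.Int.mod_eq_zero_iff_dvd t i).mp hm)
      rw [pairsA, dif_pos hg, if_neg hmod]
      exact ih t (i + 1) (by omega) ht (by omega) (fun j hj1 hj2 => hno j (by omega) hj2)
    · rw [pairsA, dif_neg hg]

-- A's scan moves from i to the next divisor d without effect
theorem pairsA_scanTo (mu : Nat) : ∀ t i d : Int, (d - i).toNat ≤ mu → 2 ≤ i → i ≤ d →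
    d * d ≤ t → (∀ j, i ≤ j → j < d → ¬ j ∣ t) → pairsA t i = pairsA t d := by
  induction mu with
  | zero =>
    intro t i d hmu hi hid hsq hno
    have : i = d := by omega
    rw [this]
  | succ mu ih =>
    intro t i d hmu hi hid hsq hno
    rcases eq_or_lt_of_le hid with heq | hlt
    · rw [heq]
    · have hii : i * i ≤ t := by nlinarith
      have hmod : ¬ PySem.Int.mod t i = 0 := fun hm =>
        hno i (le_refl i) hlt ((PySem.Int.mod_eq_zero_iff_dvd t i).mp hm)
      rw [pairsA, dif_pos ⟨hi, hii⟩, if_neg hmod]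
      exact ih t (i + 1) d (by omega) (by omega) (by omega) hsq
        (fun j hj1 hj2 => hno j (by omega) hj2)

-- one unfolding of B's factorize at a composite-or-prime t ≥ 2
theorem bFactorizeF_succ (mu : Nat) (t : Int) (h : ¬ t ≤ 1) :
    bFactorizeF (mu + 1) t =
      ((if t < spfScanF ((t - 2).toNat + 1) t 2 * spfScanF ((t - 2).toNat + 1) t 2 then t
         else spfScanF ((t - 2).toNat + 1) t 2),
        (bStripF t.toNat t (if t < spfScanF ((t - 2).toNat + 1) t 2 * spfScanF ((t - 2).toNat + 1) t 2 then t else spfScanF ((t - 2).toNat + 1) t 2)).2) ::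
        bFactorizeF mu (bStripF t.toNat t (if t < spfScanF ((t - 2).toNat + 1) t 2 * spfScanF ((t - 2).toNat + 1) t 2 then t else spfScanF ((t - 2).toNat + 1) t 2)).1 := by
  simp [bFactorizeF, if_neg h]

-- main bridge: A's one-sweep factor list equals B's recursive smallest-factor list
theorem pvBridge (mu : Nat) : ∀ t i : Int, t.toNat ≤ mu → 1 ≤ t → 2 ≤ i →
    (∀ j, 2 ≤ j → j < i → ¬ j ∣ t) → pairsAList t i = bFactorizeF mu t := by
  induction mu with
  | zero =>
    intro t i hmu ht hi hno
    omega
  | succ mu ih =>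
    intro t i hmu ht hi hno
    by_cases ht2 : 2 ≤ t
    · have hrange := pvSpfScanF_range ((t - 2).toNat + 1) t 2 (le_refl 2) (by omega)
      set d := spfScanF ((t - 2).toNat + 1) t 2 with hddef
      obtain ⟨hd2, hskip, hexit⟩ := hrange
      by_cases hc : t < d * d
      · -- t is its own smallest factor: A's scan is empty, the leftover carries it
        have hall : ∀ q, 2 ≤ q → q * q ≤ t → ¬ q ∣ t := by
          intro q hq hsq
          have : q < d := by nlinarith
          exact (hskip q hq this).2
        have hpa : pairsA t i = ([], t) :=
          pairsA_none (2 * t - i).toNat t i (le_refl _) ht hi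
            (fun j hj1 hj2 => hall j (by omega) hj2)
        have hm : PySem.Int.mod t t = 0 := (PySem.Int.mod_eq_zero_iff_dvd t t).mpr (dvd_refl t)
        have hdiv : PySem.Int.floordiv t t = 1 := by
          rw [PySem.Int.floordiv_eq_ediv_of_pos (by omega)]
          exact Int.ediv_self (by omega)
        have hm1 : ¬ PySem.Int.mod 1 t = 0 := by
          intro hm1
          have := (PySem.Int.mod_eq_zero_iff_dvd 1 t).mp hm1
          have := Int.le_of_dvd one_pos this
          omega
        have hext : pyExtract t t = (1, 1) := by
          rw [pyExtract, dif_pos ⟨ht2, ht, hm⟩, hdiv,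
            pyExtract, dif_neg (fun hc => hm1 hc.2.2)]
          rfl
        have hstrip : bStripF t.toNat t t = (1, 1) := by
          rw [bStripF_eq_pyExtract t.toNat t t ht ht2 (le_refl _), hext]
        have hb1 : bFactorizeF mu 1 = [] := by
          cases mu with
          | zero => rfl
          | succ mu => simp [bFactorizeF]
        rw [bFactorizeF_succ mu t (by omega), ← hddef, if_pos hc, hstrip]
        unfold pairsAList
        rw [hpa]
        simp only [hb1]
        simp [show (1 : Int) < t by omega]
      · -- the scan's result d is the smallest prime factor; both lists start with (d, c)
        have hmodd : PySem.Int.mod t d = 0 := by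
          rcases hexit with hlt | hm
          · exact absurd hlt hc
          · exact hm
        have hsq : d * d ≤ t := by omega
        have hddvd : d ∣ t := (PySem.Int.mod_eq_zero_iff_dvd t d).mp hmodd
        have hsmall : ∀ j, 2 ≤ j → j < d → ¬ j ∣ t :=
          fun j hj1 hj2 => (hskip j hj1 hj2).2
        have hid : i ≤ d := by
          by_contra hcon
          exact hno d hd2 (by omega) hddvd
        have hscan : pairsA t i = pairsA t d :=
          pairsA_scanTo (d - i).toNat t i d (le_refl _) hi hid hsq
            (fun j hj1 hj2 => hsmall j (by omega) hj2)
        have hespec := pvExtract_spec t d ht hd2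
        have helt := pvExtract_lt t d ht hd2 hmodd
        have hpa : pairsA t d =
            ((d, (pyExtract t d).1) ::
              (pairsA (pyExtract t d).2 (d + 1)).1,
             (pairsA (pyExtract t d).2 (d + 1)).2) := by
          rw [pairsA, dif_pos ⟨hd2, hsq⟩, if_pos hmodd]
        have hih : pairsAList (pyExtract t d).2 (d + 1) = bFactorizeF mu (pyExtract t d).2 := by
          refine ih _ _ (by omega) hespec.1 (by omega) ?_
          intro j hj1 hj2 hjd
          rcases eq_or_lt_of_le (show j ≤ d by omega) with heq | hlt
          · rw [heq] at hjd
            exact hespec.2.2.2.1 hjd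
          · exact hsmall j hj1 hlt (hjd.trans hespec.2.2.1)
        rw [bFactorizeF_succ mu t (by omega), ← hddef, if_neg hc,
          bStripF_eq_pyExtract t.toNat t d ht hd2 (le_refl _)]
        unfold pairsAList
        rw [hscan, hpa]
        simp only [List.cons_append]
        rw [← hih]
        unfold pairsAList
        rfl
    · -- t = 1: both lists are empty
      have ht1 : t = 1 := by omega
      subst ht1
      have hpa : pairsA 1 i = ([], 1) :=
        pairsA_none (2 * 1 - i).toNat 1 i (le_refl _) (by norm_num) hi
          (fun j hj1 hj2 hd => by nlinarith)
      unfold pairsAList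
      rw [hpa]
      have hb1 : bFactorizeF (mu + 1) 1 = [] := by simp [bFactorizeF]
      rw [hb1]
      norm_num

-- every prime B's factorize emits is at least 2
theorem pvSpfScanF_ge (fu : Nat) : ∀ t d : Int, d ≤ spfScanF fu t d := by
  induction fu with
  | zero => intro t d; exact le_refl d
  | succ fu ih =>
    intro t d
    by_cases hg : d * d ≤ t ∧ PySem.Int.mod t d ≠ 0
    · rw [show spfScanF (fu + 1) t d = spfScanF fu t (d + 1) from by
        simp [spfScanF, if_pos hg]]
      exact le_trans (by omega) (ih t (d + 1))
    · rw [show spfScanF (fu + 1) t d = d from by simp [spfScanF, if_neg hg]]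

theorem pvFact_fst (fu : Nat) : ∀ t : Int, ∀ pc ∈ bFactorizeF fu t, 2 ≤ pc.1 := by
  induction fu with
  | zero => intro t pc hpc; exact absurd hpc (List.not_mem_nil)
  | succ fu ih =>
    intro t pc hpc
    by_cases ht1 : t ≤ 1
    · rw [show bFactorizeF (fu + 1) t = [] from by simp [bFactorizeF, if_pos ht1]] at hpc
      exact absurd hpc (List.not_mem_nil)
    · rw [bFactorizeF_succ fu t ht1] at hpc
      rcases List.mem_cons.mp hpc with heq | hmem
      · rw [heq]
        split
        · omega
        · exact le_trans (le_refl 2) (pvSpfScanF_ge ((t - 2).toNat + 1) t 2)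
      · exact ih _ pc hmem

-- nested floor divisions by positive divisors compose (nonnegative dividend)
theorem pvFdivFdiv (a q p : Int) (ha : 0 ≤ a) (hq : 0 < q) (hp : 0 < p) :
    PySem.Int.floordiv (PySem.Int.floordiv a q) p = PySem.Int.floordiv a (q * p) := by
  rw [PySem.Int.floordiv_eq_ediv_of_pos hq, PySem.Int.floordiv_eq_ediv_of_pos hp,
    PySem.Int.floordiv_eq_ediv_of_pos (mul_pos hq hp)]
  exact Int.ediv_ediv_of_nonneg (le_of_lt hq)

-- B's ascending-powers loop computes the recursive Legendre value
theorem pvVp_eq (n p : Int) (hn : 0 ≤ n) (hp : 2 ≤ p) : ∀ (fu : Nat) (q e : Int), 1 ≤ q →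
    (n + 1 - q).toNat < fu →
    bVpF fu n p q e = e + PySem.Int.floordiv n q + bLegendre (PySem.Int.floordiv n q) p := by
  intro fu
  induction fu with
  | zero =>
    intro q e hq hfu
    omega
  | succ fu ih =>
    intro q e hq hfu
    by_cases hqn : q ≤ n
    · have hq1 : 1 ≤ PySem.Int.floordiv n q := by
        rw [PySem.Int.le_floordiv_iff_mul_le (by omega)]; omega
      have hqp1 : q + 1 ≤ q * p := by nlinarith
      rw [show bVpF (fu + 1) n p q e =
          bVpF fu n p (q * p) (e + PySem.Int.floordiv n q) from by
        simp [bVpF, if_pos hqn]]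
      rw [ih (q * p) (e + PySem.Int.floordiv n q) (by omega) (by omega)]
      conv_rhs => rw [bLegendre, dif_pos ⟨by omega, by omega, hp⟩]
      rw [pvFdivFdiv n q p hn (by omega) (by omega)]
      ring
    · rw [show bVpF (fu + 1) n p q e = e from by simp [bVpF, if_neg hqn]]
      have hz : PySem.Int.floordiv n q = 0 := by
        rw [PySem.Int.floordiv_eq_ediv_of_pos (by omega)]
        exact Int.ediv_eq_zero_of_lt hn (by omega)
      rw [hz, bLegendre, dif_neg (by norm_num)]
      ring

theorem pvVp_leg (n p : Int) (hn : 0 ≤ n) (hp : 2 ≤ p) :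
    bVpF ((n + 1 - p).toNat + 1) n p p 0 = bLegendre n p := by
  rw [pvVp_eq n p hn hp ((n + 1 - p).toNat + 1) p 0 (by omega) (by omega), zero_add]
  by_cases h0 : 0 < n
  · conv_rhs => rw [bLegendre, dif_pos ⟨by omega, h0, hp⟩]
  · have hn0 : n = 0 := by omega
    subst hn0
    have hz : PySem.Int.floordiv 0 p = 0 := by
      rw [PySem.Int.floordiv_eq_ediv_of_pos (by omega)]
      exact Int.zero_ediv p
    rw [hz]
    ring

-- A's option-minimum fold over the factor list is B's plain minimum of the mapped values
theorem pvFoldGen (n : Int) (tl : List (Int × Int)) : ∀ v : Int,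
    (match tl.foldl (mstep n) (some v) with | some a => a | none => 0)
    = (tl.map (fun pc => PySem.Int.floordiv (bLegendre n pc.1) pc.2)).foldl min v := by
  induction tl with
  | nil => intro v; rfl
  | cons hd tl ih =>
    intro v
    simp only [List.foldl_cons, List.map_cons]
    rw [show mstep n (some v) hd =
        some (if PySem.Int.floordiv (bLegendre n hd.1) hd.2 < v
          then PySem.Int.floordiv (bLegendre n hd.1) hd.2 else v) from rfl]
    rw [ih]
    congr 1
    rcases lt_or_ge (PySem.Int.floordiv (bLegendre n hd.1) hd.2) v with hlt | hge
    · rw [if_pos hlt, min_eq_right (le_of_lt hlt)]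
    · rw [if_neg (not_lt.mpr hge), min_eq_left hge]

theorem pvMinMatch (n : Int) (l : List (Int × Int)) :
    (match l.foldl (mstep n) none with | some a => a | none => 0)
    = (match l.map (fun pc => PySem.Int.floordiv (bLegendre n pc.1) pc.2) with
       | [] => 0 | v :: rest => rest.foldl min v) := by
  cases l with
  | nil => rfl
  | cons hd tl =>
    simp only [List.foldl_cons, List.map_cons]
    rw [show mstep n none hd = some (PySem.Int.floordiv (bLegendre n hd.1) hd.2) from rfl]
    exact pvFoldGen n tl (PySem.Int.floordiv (bLegendre n hd.1) hd.2)

-- ===== VERDICT (by name: the statement is the Claim_ definition above) =====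
theorem compute_trailing_zeros_py_spec : Claim_equal_compute_trailing_zeros_py := by
  intro n k _hdom hpre
  unfold Spec_compute_trailing_zeros_py
  by_cases hk : k ≤ 1
  · have hpa : pairsA k 2 = ([], k) := by
      rw [pairsA, dif_neg (fun hcc => by omega)]
    rw [aVal]
    unfold pairsAList
    rw [hpa]
    simp only [if_neg (show ¬ (1 : Int) < k by omega), List.append_nil]
    unfold compute_trailing_zeros_py_alt
    rw [show bFactorize k = [] from by
      unfold bFactorize
      cases hkn : k.toNat with
      | zero => rfl
      | succ m => simp [bFactorizeF, show k ≤ 1 from hk]]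
    rfl
  · have hn : 0 ≤ n := by
      rcases hpre with h | h
      · exact h
      · omega
    have hbr : pairsAList k 2 = bFactorize k :=
      pvBridge k.toNat k 2 (le_refl _) (by omega) (le_refl 2)
        (fun j hj1 hj2 _ => by omega)
    have hmap : (bFactorize k).map
          (fun pc => PySem.Int.floordiv (bVpF ((n + 1 - pc.1).toNat + 1) n pc.1 pc.1 0) pc.2)
        = (bFactorize k).map (fun pc => PySem.Int.floordiv (bLegendre n pc.1) pc.2) :=
      List.map_congr_left (fun pc hpc => by
        rw [pvVp_leg n pc.1 hn (pvFact_fst k.toNat k pc hpc)])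
    unfold compute_trailing_zeros_py_alt
    rw [hmap, aVal, hbr]
    exact pvMinMatch n (bFactorize k)
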